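-- pv_equiv track=rewrite | github.com/sethkarten/pokeagent-speedrun | eval/make_h6_artifacts.py | dedupe_by_step
-- ===== SOURCE A (Python) =====
-- def dedupe_by_step(rows: list[dict]) -> list[dict]:
--     """losses.jsonl has one row per rank per step. Keep one row per step."""
--     seen = {}
--     for r in rows:
--         step = r.get("step")
--         if step is None:
--             continue
--         if step not in seen:
--             seen[step] = r
--     return [seen[k] for k in sorted(seen.keys())]
-- ===== SOURCE B (Python) =====
-- def dedupe_by_step(rows: list[dict]) -> list[dict]:
--     """losses.jsonl has one row per rank per step. Keep one row per step."""
--     steps = sorted({r["step"] for r in rows if r.get("step") is not None})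
--     return [next(r for r in rows if r.get("step") == s) for s in steps]
-- ===== Notes on version B (the rewrite author's own statement) =====
-- stated objective: simpler
-- what changed: Replaces the first-wins dict built in one pass (then sorted by key) by a two-liner: collect the set of steps, sort it, and for each step linearly search rows for the first row carrying it.
import Mathlib
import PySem

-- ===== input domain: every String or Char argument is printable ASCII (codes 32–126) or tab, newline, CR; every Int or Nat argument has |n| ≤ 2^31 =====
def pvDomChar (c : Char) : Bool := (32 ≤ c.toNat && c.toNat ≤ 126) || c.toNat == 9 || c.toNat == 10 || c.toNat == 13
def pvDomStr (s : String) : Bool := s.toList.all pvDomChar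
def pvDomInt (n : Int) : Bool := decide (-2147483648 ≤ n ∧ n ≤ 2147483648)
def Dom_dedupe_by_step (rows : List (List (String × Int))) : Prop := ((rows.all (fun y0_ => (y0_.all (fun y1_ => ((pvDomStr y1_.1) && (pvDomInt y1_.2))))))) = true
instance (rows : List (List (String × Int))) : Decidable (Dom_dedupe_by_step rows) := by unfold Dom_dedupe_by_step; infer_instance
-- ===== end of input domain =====

-- B replaces A's one-pass first-wins dict with "sorted step set + per-step first search": simpler, not faster.

-- r.get("step")  (dicts are association lists; first match wins)
def pvStep (r : List (String × Int)) : Option Int := (PySem.Dict.mk r).get? "step"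

-- ===== PORT A =====
-- loop body of A: skip rows without "step", first row per step wins
def stepA (seen : PySem.Dict Int (List (String × Int))) (r : List (String × Int)) :
    PySem.Dict Int (List (String × Int)) :=
  match pvStep r with
  | none => seen
  | some step => if seen.contains step then seen else seen.insert step r

def dedupe_by_step (rows : List (List (String × Int))) : List (List (String × Int)) :=
  let seen := rows.foldl stepA PySem.Dict.empty
  -- seen[k]: k ranges over seen.keys, so the lookup always hits; getD [] is that total lookup
  (PySem.List.sorted seen.keys (fun k => k) false).map (fun k => seen.getD k [])

-- ===== PORT B =====
def dedupe_by_step_alt (rows : List (List (String × Int))) : List (List (String × Int)) :=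
  let steps := PySem.List.sorted (PySem.Set.ofList (rows.filterMap pvStep)) (fun k => k) false
  -- next(...): s comes from the rows' steps, so find? always hits; getD [] is that total search
  steps.map (fun s => (rows.find? (fun r => pvStep r == some s)).getD [])

-- ===== PRECONDITION & SPEC =====
def Spec_dedupe_by_step (rows : List (List (String × Int))) (out : List (List (String × Int))) : Prop := out = dedupe_by_step_alt rows
instance (rows : List (List (String × Int))) (out : List (List (String × Int))) : Decidable (Spec_dedupe_by_step rows out) := by unfold Spec_dedupe_by_step; infer_instance

-- ===== CLAIM (what is proved, stated in full; the proofs are below) =====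
def Claim_equal_dedupe_by_step : Prop := ∀ (rows : List (List (String × Int))), Dom_dedupe_by_step rows → Spec_dedupe_by_step rows (dedupe_by_step rows)

-- ===== LEMMAS AND PROOFS =====

-- the dict built by A's loop answers get? k with: "d's answer, else the first row of l whose step is k"
theorem foldl_stepA_get? (l : List (List (String × Int)))
    (d : PySem.Dict Int (List (String × Int))) (k : Int) :
    (l.foldl stepA d).get? k
      = (d.get? k).or (l.find? (fun r => pvStep r == some k)) := by
  induction l generalizing d with
  | nil => simp
  | cons r t ih =>
    simp only [List.foldl_cons, List.find?_cons]
    rcases h : pvStep r with _ | k0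
    · simp [stepA, h, ih]
    · by_cases hc : d.contains k0
      · by_cases hk : k0 = k
        · subst hk
          have hs : (d.get? k0).isSome := by
            rw [← PySem.Dict.contains_eq_isSome_get?]; exact hc
          rcases Option.isSome_iff_exists.mp hs with ⟨v, hv⟩
          simp [stepA, h, hc, ih, hv]
        · have hkb : (k0 == k) = false := by simpa using hk
          simp [stepA, h, hc, ih, hkb]
      · by_cases hk : k0 = k
        · subst hk
          have hn : d.get? k0 = none := by
            rw [PySem.Dict.get?_eq_none_iff_contains]
            simpa using hc
          simp [stepA, h, hc, ih, hn, PySem.Dict.get?_insert_self]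
        · have hkb : (k0 == k) = false := by simpa using hk
          simp [stepA, h, hc, ih, hkb,
            PySem.Dict.get?_insert_of_ne d r (Ne.symm hk)]

theorem foldl_stepA_nodup (l : List (List (String × Int)))
    (d : PySem.Dict Int (List (String × Int))) (hd : d.keys.Nodup) :
    (l.foldl stepA d).keys.Nodup := by
  induction l generalizing d with
  | nil => simpa
  | cons r t ih =>
    simp only [List.foldl_cons]
    rcases h : pvStep r with _ | k0
    · have hr : stepA d r = d := by simp [stepA, h]
      rw [hr]; exact ih d hd
    · by_cases hc : d.contains k0
      · have hr : stepA d r = d := by simp [stepA, h, hc]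
        rw [hr]; exact ih d hd
      · have hr : stepA d r = d.insert k0 r := by simp [stepA, h, hc]
        rw [hr]; exact ih _ (PySem.Dict.nodup_keys_insert d k0 r hd)

-- membership in the loop dict's keys = the step occurs in rows
theorem mem_keys_foldl_stepA (rows : List (List (String × Int))) (k : Int) :
    k ∈ (rows.foldl stepA PySem.Dict.empty).keys
      ↔ k ∈ rows.filterMap pvStep := by
  rw [← not_iff_not]
  rw [← PySem.Dict.get?_eq_none_iff_not_mem_keys]
  rw [foldl_stepA_get?]
  simp [List.find?_eq_none, List.mem_filterMap]

theorem dedupe_by_step_spec : Claim_equal_dedupe_by_step := by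
  intro rows _
  unfold Spec_dedupe_by_step
  rw [show dedupe_by_step rows
        = (PySem.List.sorted (rows.foldl stepA PySem.Dict.empty).keys (fun k => k) false).map
            (fun k => (rows.foldl stepA PySem.Dict.empty).getD k []) from rfl,
      show dedupe_by_step_alt rows
        = (PySem.List.sorted (PySem.Set.ofList (rows.filterMap pvStep)) (fun k => k) false).map
            (fun s => (rows.find? (fun r => pvStep r == some s)).getD []) from rfl]
  have hsorted :
      PySem.List.sorted (rows.foldl stepA PySem.Dict.empty).keys (fun k => k) false
        = PySem.List.sorted (PySem.Set.ofList (rows.filterMap pvStep)) (fun k => k) false := by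
    apply PySem.List.sorted_eq_sorted_of_perm
    · intro a b hab; exact hab
    · refine (List.perm_ext_iff_of_nodup ?_ ?_).mpr ?_
      · exact foldl_stepA_nodup rows PySem.Dict.empty (by simp)
      · exact PySem.Set.nodup_ofList _
      · intro a
        rw [mem_keys_foldl_stepA, PySem.Set.mem_ofList]
  rw [hsorted]
  apply List.map_congr_left
  intro k _
  rw [PySem.Dict.getD_eq_get?_getD, foldl_stepA_get?]
  simp
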